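-- pv_equiv track=rewrite | github.com/pypi-data/pypi-mirror-376 | packages/fastmarkdocs/fastmarkdocs-0.5.0.tar.gz/fastmarkdocs-0.5.0/src/fastmarkdocs/linter.py | _extract_todo_context
-- ===== SOURCE A (Python) =====
-- def _extract_todo_context(lines: list[str], todo_line_index: int) -> str:
--     """
--     Extract context around a TODO entry to help identify what section it's in.
--
--     Args:
--         lines: All lines in the file
--         todo_line_index: Zero-based index of the TODO line
--
--     Returns:
--         Context string (e.g., "in endpoint GET /users", "in Parameters section")
--     """
--     # Look backwards for headings and build context
--     section_context = None
--     endpoint_context = None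
--
--     for i in range(todo_line_index - 1, max(0, todo_line_index - 20), -1):
--         line = lines[i].strip()
--
--         # Check for endpoint headers (## GET /path)
--         if line.startswith("##") and any(method in line for method in ["GET", "POST", "PUT", "PATCH", "DELETE"]):
--             # Extract method and path
--             parts = line.split(" ", 2)
--             if len(parts) >= 3:
--                 method = parts[1]
--                 path = parts[2]
--                 endpoint_context = f"in endpoint {method} {path}"
--                 break  # Found endpoint, stop looking
--
--         # Check for section headers (capture the most recent one)
--         elif (line.startswith("###") or line.startswith("####")) and section_context is None:
--             if line.startswith("####"):
--                 section = line.replace("####", "").strip()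
--             else:
--                 section = line.replace("###", "").strip()
--             section_context = f"in {section} section"
--
--     # Return the most specific context available
--     if endpoint_context:
--         return endpoint_context
--     elif section_context:
--         return section_context
--     else:
--         return "in documentation"
-- ===== SOURCE B (Python) =====
-- _METHODS = ("GET", "POST", "PUT", "PATCH", "DELETE")
--
--
-- def _extract_todo_context(lines: list[str], todo_line_index: int) -> str:
--     """Nearest heading context for a TODO line: two backward scans over the
--     same 20-line window instead of one loop with two accumulators."""
--     window = range(todo_line_index - 1, max(0, todo_line_index - 20), -1)
--
--     # Pass 1: nearest endpoint header wins outright.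
--     for i in window:
--         line = lines[i].strip()
--         if line.startswith("##") and any(m in line for m in _METHODS):
--             parts = line.split(" ", 2)
--             if len(parts) >= 3:
--                 return f"in endpoint {parts[1]} {parts[2]}"
--
--     # Pass 2: no endpoint in the window -> nearest section header.
--     for i in window:
--         line = lines[i].strip()
--         if line.startswith("###") and not any(m in line for m in _METHODS):
--             hashes = "####" if line.startswith("####") else "###"
--             return f"in {line.replace(hashes, '').strip()} section"
--
--     return "in documentation"
-- ===== Notes on version B (the rewrite author's own statement) =====
-- stated objective: simpler
-- what changed: A's single backward loop with two accumulators and a break is replaced by two independent backward scans over the same 20-line window: first an endpoint scan that returns on the nearest endpoint header, then (only if none) a section scan that returns the nearest section header.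
import Mathlib
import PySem

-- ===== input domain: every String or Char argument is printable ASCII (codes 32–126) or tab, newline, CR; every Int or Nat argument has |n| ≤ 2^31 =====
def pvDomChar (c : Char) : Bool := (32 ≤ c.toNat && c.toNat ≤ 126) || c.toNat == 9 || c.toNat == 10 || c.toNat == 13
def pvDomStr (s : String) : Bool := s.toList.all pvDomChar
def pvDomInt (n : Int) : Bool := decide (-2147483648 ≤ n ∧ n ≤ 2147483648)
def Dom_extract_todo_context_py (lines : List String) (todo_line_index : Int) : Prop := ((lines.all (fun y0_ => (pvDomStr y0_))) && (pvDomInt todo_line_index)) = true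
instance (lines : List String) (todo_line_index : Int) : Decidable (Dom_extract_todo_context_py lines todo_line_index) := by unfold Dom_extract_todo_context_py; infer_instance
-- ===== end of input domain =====

-- B replaces A's single backward loop with two accumulators by two backward scans
-- over the same window (endpoint scan, then section scan): simpler decomposition, same cost.

-- ===== PORT A =====

def pvMethods : List String := ["GET", "POST", "PUT", "PATCH", "DELETE"]

-- A's backward loop: state `sec` is section_context (None/some); `break` = early return of endpoint
def pvGoA (lines : List String) : List Int → Option String → String
  | [], sec => match sec with
    | some s => s
    | none => "in documentation"
  | i :: rest, sec =>
    let line := PySem.Str.strip ((PySem.List.pyGet? lines i).getD "")  -- Pre_ keeps i in range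
    if PySem.Str.startswith line "##" && pvMethods.any (fun m => PySem.Str.isIn m line) then
      let parts := (PySem.Str.splitMax? line " " 2).getD []  -- sep " " ≠ "": never none
      if parts.length ≥ 3 then
        "in endpoint " ++ parts[1]! ++ " " ++ parts[2]!
      else
        pvGoA lines rest sec
    else if (PySem.Str.startswith line "###" || PySem.Str.startswith line "####") && sec == none then
      let section_ :=
        if PySem.Str.startswith line "####" then
          PySem.Str.strip (PySem.Str.replace line "####" "")
        else
          PySem.Str.strip (PySem.Str.replace line "###" "")
      pvGoA lines rest (some ("in " ++ section_ ++ " section"))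
    else
      pvGoA lines rest sec

def extract_todo_context_py (lines : List String) (todo_line_index : Int) : String :=
  pvGoA lines (PySem.List.pyRange (todo_line_index - 1) (max 0 (todo_line_index - 20)) (-1)) none

-- ===== PORT B =====

-- pass 1: nearest endpoint header in the window
def pvPassEndpoint (lines : List String) : List Int → Option String
  | [] => none
  | i :: rest =>
    let line := PySem.Str.strip ((PySem.List.pyGet? lines i).getD "")
    if PySem.Str.startswith line "##" && pvMethods.any (fun m => PySem.Str.isIn m line) then
      let parts := (PySem.Str.splitMax? line " " 2).getD []
      if parts.length ≥ 3 then
        some ("in endpoint " ++ parts[1]! ++ " " ++ parts[2]!)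
      else
        pvPassEndpoint lines rest
    else
      pvPassEndpoint lines rest

-- pass 2: nearest section header in the window
def pvPassSection (lines : List String) : List Int → Option String
  | [] => none
  | i :: rest =>
    let line := PySem.Str.strip ((PySem.List.pyGet? lines i).getD "")
    if PySem.Str.startswith line "###" && !(pvMethods.any (fun m => PySem.Str.isIn m line)) then
      let hashes := if PySem.Str.startswith line "####" then "####" else "###"
      some ("in " ++ PySem.Str.strip (PySem.Str.replace line hashes "") ++ " section")
    else
      pvPassSection lines rest

def extract_todo_context_py_alt (lines : List String) (todo_line_index : Int) : String :=
  let window := PySem.List.pyRange (todo_line_index - 1) (max 0 (todo_line_index - 20)) (-1)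
  match pvPassEndpoint lines window with
  | some e => e
  | none =>
    match pvPassSection lines window with
    | some s => s
    | none => "in documentation"

-- ===== PRECONDITION & SPEC =====
-- Pre_ excludes exactly the inputs where A raises IndexError: todo_line_index ≥ 2
-- with todo_line_index - 1 beyond the end of `lines` (B raises identically there).
def Pre_extract_todo_context_py (lines : List String) (todo_line_index : Int) : Prop :=
  todo_line_index ≤ 1 ∨ todo_line_index ≤ (lines.length : Int)
instance (lines : List String) (todo_line_index : Int) : Decidable (Pre_extract_todo_context_py lines todo_line_index) := by unfold Pre_extract_todo_context_py; infer_instance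

def pvWitness_extract_todo_context_py : List String × Int :=
  (["## GET /users", "TODO: fix"], 1)

def Spec_extract_todo_context_py (lines : List String) (todo_line_index : Int) (out : String) : Prop := out = extract_todo_context_py_alt lines todo_line_index
instance (lines : List String) (todo_line_index : Int) (out : String) : Decidable (Spec_extract_todo_context_py lines todo_line_index out) := by unfold Spec_extract_todo_context_py; infer_instance

-- ===== CLAIM (what is proved, stated in full; the proofs are below) =====
def Claim_equal_extract_todo_context_py : Prop := ∀ (lines : List String) (todo_line_index : Int), Dom_extract_todo_context_py lines todo_line_index → Pre_extract_todo_context_py lines todo_line_index → Spec_extract_todo_context_py lines todo_line_index (extract_todo_context_py lines todo_line_index)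

-- ===== LEMMAS AND PROOFS =====

-- startswith "###" implies startswith "##"
theorem pv_sw3_sw2 (s : String) (h : PySem.Str.startswith s "###" = true) :
    PySem.Str.startswith s "##" = true := by
  simp only [PySem.Str.startswith_eq] at h ⊢
  rw [PySem.Chars.startswith_iff] at h ⊢
  exact List.IsPrefix.trans (by decide) h

-- startswith "####" implies startswith "###"
theorem pv_sw4_sw3 (s : String) (h : PySem.Str.startswith s "####" = true) :
    PySem.Str.startswith s "###" = true := by
  simp only [PySem.Str.startswith_eq] at h ⊢
  rw [PySem.Chars.startswith_iff] at h ⊢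
  exact List.IsPrefix.trans (by decide) h

-- the key invariant: A's loop = endpoint pass, else the saved section, else section pass
theorem pvGoA_eq (lines : List String) (idxs : List Int) (sec : Option String) :
    pvGoA lines idxs sec =
      match pvPassEndpoint lines idxs with
      | some e => e
      | none =>
        match sec with
        | some s => s
        | none =>
          match pvPassSection lines idxs with
          | some s => s
          | none => "in documentation" := by
  induction idxs generalizing sec with
  | nil => cases sec <;> rfl
  | cons i rest ih =>
    simp only [pvGoA, pvPassEndpoint, pvPassSection]
    set line := PySem.Str.strip ((PySem.List.pyGet? lines i).getD "") with hline
    by_cases h1 : (PySem.Str.startswith line "##" && pvMethods.any (fun m => PySem.Str.isIn m line)) = true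
    · rw [if_pos h1, if_pos h1]
      by_cases h2 : ((PySem.Str.splitMax? line " " 2).getD []).length >= 3
      · rw [if_pos h2, if_pos h2]
      · -- endpoint branch fails the parts test; section pass skips (a method is present)
        have hm : (pvMethods.any (fun m => PySem.Str.isIn m line)) = true :=
          (Bool.and_eq_true_iff.mp h1).2
        have hno : ¬ ((PySem.Str.startswith line "###" && !(pvMethods.any (fun m => PySem.Str.isIn m line))) = true) := by
          intro hy
          have := (Bool.and_eq_true_iff.mp hy).2
          rw [hm] at this
          exact Bool.false_ne_true this
        rw [if_neg h2, if_neg h2, if_neg hno, ih sec]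
    · rw [if_neg h1, if_neg h1]
      by_cases h3 : ((PySem.Str.startswith line "###" || PySem.Str.startswith line "####") && sec == none) = true
      · -- a new section is recorded; section pass returns it too
        have hsw : (PySem.Str.startswith line "###" || PySem.Str.startswith line "####") = true :=
          (Bool.and_eq_true_iff.mp h3).1
        have hsecnone : (sec == none) = true := (Bool.and_eq_true_iff.mp h3).2
        have hsw3 : PySem.Str.startswith line "###" = true := by
          rcases Bool.or_eq_true_iff.mp hsw with h | h
          · exact h
          · exact pv_sw4_sw3 _ h
        have hnm : (pvMethods.any (fun m => PySem.Str.isIn m line)) = false := by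
          cases hmm : pvMethods.any (fun m => PySem.Str.isIn m line)
          · rfl
          · exact absurd (Bool.and_eq_true_iff.mpr ⟨pv_sw3_sw2 _ hsw3, hmm⟩) h1
        have hsec : sec = none := by
          cases sec with
          | none => rfl
          | some s => exact absurd hsecnone (by simp)
        subst hsec
        have hyes : (PySem.Str.startswith line "###" && !(pvMethods.any (fun m => PySem.Str.isIn m line))) = true :=
          Bool.and_eq_true_iff.mpr ⟨hsw3, by rw [hnm]; rfl⟩
        rw [if_pos h3, if_pos hyes, ih]
        cases hpe : pvPassEndpoint lines rest
        · by_cases h4 : PySem.Str.startswith line "####" = true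
          · rw [if_pos h4, if_pos h4]
          · rw [if_neg h4, if_neg h4]
        · rfl
      · rw [if_neg h3, ih sec]
        -- when sec is none, h3's failure means line is not a section header either
        cases sec with
        | some s => rfl
        | none =>
          have hno : ¬ ((PySem.Str.startswith line "###" && !(pvMethods.any (fun m => PySem.Str.isIn m line))) = true) := by
            intro hy
            have hsw3 := (Bool.and_eq_true_iff.mp hy).1
            exact h3 (Bool.and_eq_true_iff.mpr ⟨Bool.or_eq_true_iff.mpr (Or.inl hsw3), rfl⟩)
          rw [if_neg hno]

-- ===== VERDICT (by name: the statement is the Claim_ definition above) =====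
theorem extract_todo_context_py_spec : Claim_equal_extract_todo_context_py := by
  intro lines t _ _
  unfold Spec_extract_todo_context_py extract_todo_context_py extract_todo_context_py_alt
  exact pvGoA_eq lines _ none
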